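-- pv_equiv track=rewrite | github.com/devejs/Algorithm | SWEA/swea_2117_python.py | cal_k_count
-- ===== SOURCE A (Python) =====
-- def cal_k_count(k):
--     count = 0
--     for i in range(2*k-1):
--         if i <= k:
--             count += 1+2*i
--         else:
--             count += 1+2*(k-2+(k-i))
--     return count
-- ===== SOURCE B (Python) =====
-- def cal_k_count(k):
--     if k <= 0:
--         return 0
--     if k == 1:
--         return 1
--     return (k + 1) ** 2 + (k - 2) ** 2
-- ===== Notes on version B (the rewrite author's own statement) =====
-- stated objective: faster
-- what changed: Replaces the O(k) loop over range(2k-1) with a closed-form arithmetic-series formula (k+1)^2 + (k-2)^2 (with the k<=1 base cases).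
import Mathlib
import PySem

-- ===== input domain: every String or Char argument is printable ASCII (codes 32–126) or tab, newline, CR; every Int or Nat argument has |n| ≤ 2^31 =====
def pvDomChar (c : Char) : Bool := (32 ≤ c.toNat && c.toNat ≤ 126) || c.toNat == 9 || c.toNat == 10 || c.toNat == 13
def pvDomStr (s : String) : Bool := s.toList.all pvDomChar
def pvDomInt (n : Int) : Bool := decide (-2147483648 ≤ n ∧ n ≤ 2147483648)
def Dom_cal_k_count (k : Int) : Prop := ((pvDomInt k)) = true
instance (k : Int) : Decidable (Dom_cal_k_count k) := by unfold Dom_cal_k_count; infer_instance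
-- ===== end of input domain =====

-- B replaces A's O(k) loop with the closed-form value (k+1)^2 + (k-2)^2 (0 for k ≤ 0, 1 for k = 1); proved equal for all k.


-- ===== PORT A =====
-- literal port: count = 0; for i in range(2*k-1): …
def cal_k_count (k : Int) : Int :=
  (PySem.List.pyRange 0 (2 * k - 1) 1).foldl
    (fun count i =>
      if i ≤ k then count + (1 + 2 * i)
      else count + (1 + 2 * (k - 2 + (k - i)))) 0

-- ===== PORT B =====
-- literal port of Source B: closed form
def cal_k_count_alt (k : Int) : Int :=
  if k ≤ 0 then 0
  else if k = 1 then 1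
  else (k + 1) ^ 2 + (k - 2) ^ 2

-- ===== PRECONDITION & SPEC =====
def Spec_cal_k_count (k : Int) (out : Int) : Prop := out = cal_k_count_alt k
instance (k : Int) (out : Int) : Decidable (Spec_cal_k_count k out) := by unfold Spec_cal_k_count; infer_instance

-- ===== CLAIM (what is proved, stated in full; the proofs are below) =====
def Claim_equal_cal_k_count : Prop := ∀ (k : Int), Dom_cal_k_count k → Spec_cal_k_count k (cal_k_count k)

-- ===== LEMMAS AND PROOFS =====

-- invariant: after n iterations A's accumulator equals pvF k n, where a = min n (max (k+1) 0)
-- counts the iterations taken in the `if` branch (sum of first a odd numbers = a^2) and the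
-- rest take the `else` branch (an arithmetic series)
def pvF (k : Int) (n : Nat) : Int :=
  (min (n : Int) (max (k + 1) 0)) ^ 2
    + ((n : Int) - min (n : Int) (max (k + 1) 0)) * (4 * k - 3)
    - (((n : Int) - 1) * (n : Int)
        - (min (n : Int) (max (k + 1) 0) - 1) * min (n : Int) (max (k + 1) 0))

theorem pvF_loop (k : Int) : ∀ n : Nat,
    ((List.range n).map (fun j : Nat => (0 : Int) + (j : Int))).foldl
      (fun count i =>
        if i ≤ k then count + (1 + 2 * i)
        else count + (1 + 2 * (k - 2 + (k - i)))) 0 = pvF k n := by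
  intro n
  induction n with
  | zero =>
    simp only [List.range_zero, List.map_nil, List.foldl_nil, pvF, Nat.cast_zero]
    rw [show min (0 : Int) (max (k + 1) 0) = 0 from by omega]
    ring
  | succ n ih =>
    rw [List.range_succ, List.map_append, List.foldl_append, ih]
    simp only [List.map_cons, List.map_nil, List.foldl_cons, List.foldl_nil, zero_add, pvF]
    push_cast
    by_cases h : (n : Int) ≤ k
    · rw [if_pos h,
        show min ((n : Int) + 1) (max (k + 1) 0) = (n : Int) + 1 from by omega,
        show min ((n : Int)) (max (k + 1) 0) = (n : Int) from by omega]
      ring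
    · rw [if_neg h,
        show min ((n : Int) + 1) (max (k + 1) 0) = max (k + 1) 0 from by omega,
        show min ((n : Int)) (max (k + 1) 0) = max (k + 1) 0 from by omega]
      ring

theorem cal_k_count_spec : Claim_equal_cal_k_count := by
  intro k _
  unfold Spec_cal_k_count cal_k_count cal_k_count_alt
  rw [PySem.List.pyRange_one, pvF_loop]
  by_cases hk0 : k ≤ 0
  · rw [if_pos hk0, show (2 * k - 1 - 0).toNat = 0 from by omega]
    simp only [pvF, Nat.cast_zero]
    rw [show min (0 : Int) (max (k + 1) 0) = 0 from by omega]
    ring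
  · rw [if_neg hk0]
    by_cases hk1 : k = 1
    · subst hk1; norm_num [pvF]
    · rw [if_neg hk1]
      simp only [pvF]
      rw [show (((2 * k - 1 - 0).toNat : Nat) : Int) = 2 * k - 1 from by omega,
        show min (2 * k - 1 : Int) (max (k + 1) 0) = k + 1 from by omega]
      ring

-- ===== VERDICT (by name: the statement is the Claim_ definition above) =====
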